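-- pv_equiv track=rewrite | github.com/kamilhandzlik/my-daily-practice | code wars/6kyu/Dashatize_it.py | dash_ref
-- ===== SOURCE A (Python) =====
-- def dash_ref(n):
--     s = str(abs(n))
--     out = []
--     for ch in s:
--         if int(ch) % 2:
--             out.append(f"-{ch}-")
--         else:
--             out.append(ch)
--     return ''.join(out).replace("--", "-").strip("-")
-- ===== SOURCE B (Python) =====
-- def dash_ref(n):
--     s = str(abs(n))
--     parts = [s[0]]
--     for a, b in zip(s, s[1:]):
--         if int(a) % 2 or int(b) % 2:
--             parts.append('-')
--         parts.append(b)
--     return ''.join(parts)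
-- ===== Notes on version B (the rewrite author's own statement) =====
-- stated objective: alternative
-- what changed: B builds the result in a single pass, deciding each dash directly from the parity of the two adjacent digits, instead of A's over-generation of '-c-' blocks followed by replace('--','-') and strip('-') cleanup passes.
import Mathlib
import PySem

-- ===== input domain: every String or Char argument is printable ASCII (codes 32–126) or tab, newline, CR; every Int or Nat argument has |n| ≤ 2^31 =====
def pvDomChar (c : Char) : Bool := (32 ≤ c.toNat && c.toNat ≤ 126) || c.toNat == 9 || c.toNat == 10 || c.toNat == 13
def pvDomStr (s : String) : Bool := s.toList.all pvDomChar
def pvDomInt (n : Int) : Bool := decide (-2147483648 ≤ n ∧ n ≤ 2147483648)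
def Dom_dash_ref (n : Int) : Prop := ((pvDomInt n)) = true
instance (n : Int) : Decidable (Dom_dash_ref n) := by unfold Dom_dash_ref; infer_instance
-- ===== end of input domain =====

-- B places each dash directly from the parity of the two adjacent digits in one pass,
-- instead of over-generating dashes and cleaning them up with replace/strip (alternative decomposition).

-- shared subexpression of both Pythons: truthiness of int(ch) % 2
def pvOdd (ch : Char) : Bool := PySem.Int.mod ((PySem.Int.ofChars? [ch]).getD 0) 2 != 0

-- ===== PORT A =====
def dash_ref (n : Int) : String :=
  let s := PySem.Int.toStr |n|
  let out : List String := s.toList.foldl (fun acc ch =>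
      acc ++ [if pvOdd ch then String.ofList ['-', ch, '-'] else String.ofList [ch]]) []
  PySem.Str.stripChars (PySem.Str.replace (PySem.Str.join "" out) "--" "-") "-"

-- ===== PORT B =====
-- parts holds only one-character strings, so it is ported as a List Char and the final
-- ''.join(parts) as String.ofList (exact); s[0] is safe: str(abs(n)) is never empty.
def dash_ref_alt (n : Int) : String :=
  let cs := (PySem.Int.toStr |n|).toList
  let parts : List Char := (cs.zip (cs.drop 1)).foldl
      (fun acc ab => acc ++ (if pvOdd ab.1 || pvOdd ab.2 then ['-'] else []) ++ [ab.2])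
      [cs.headD ' ']
  String.ofList parts

-- ===== PRECONDITION & SPEC =====
def Spec_dash_ref (n : Int) (out : String) : Prop := out = dash_ref_alt n
instance (n : Int) (out : String) : Decidable (Spec_dash_ref n out) := by unfold Spec_dash_ref; infer_instance

-- ===== CLAIM (what is proved, stated in full; the proofs are below) =====
def Claim_equal_dash_ref : Prop := ∀ (n : Int), Dom_dash_ref n → Spec_dash_ref n (dash_ref n)

-- ===== LEMMAS AND PROOFS =====

-- A's per-digit block and their concatenation
def pvBlk (c : Char) : List Char := if pvOdd c then ['-', c, '-'] else [c]
def pvJ (cs : List Char) : List Char := cs.flatMap pvBlk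

-- the collapsed middle part: between consecutive characters a dash iff either side is odd
def pvCore : Bool → List Char → List Char
  | _, [] => []
  | prev, c :: t => (if prev || pvOdd c then ['-'] else []) ++ c :: pvCore (pvOdd c) t

-- parity of the last character (prev if the list is empty)
def pvLast : Bool → List Char → Bool
  | prev, [] => prev
  | _, c :: t => pvLast (pvOdd c) t

-- left-to-right collapse of "--" into "-" (what replace("--","-") does)
def pvRep : List Char → List Char
  | [] => []
  | [c] => [c]
  | c :: d :: t => if c = '-' ∧ d = '-' then '-' :: pvRep t else c :: pvRep (d :: t)

theorem pvRep_dd (t : List Char) : pvRep ('-' :: '-' :: t) = '-' :: pvRep t := by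
  simp [pvRep]

theorem pvRep_cons_ne (c : Char) (t : List Char) (h : c ≠ '-') :
    pvRep (c :: t) = c :: pvRep t := by
  cases t with
  | nil => simp [pvRep]
  | cons d t' => simp [pvRep, h]

theorem pvRep_dash_cons_ne (c : Char) (t : List Char) (h : c ≠ '-') :
    pvRep ('-' :: c :: t) = '-' :: pvRep (c :: t) := by
  simp [pvRep, h]

-- replace.go with old = "--", new = "-" is pvRep
theorem pv_go_eq (fuel : Nat) (l acc : List Char) (h : l.length ≤ fuel) :
    PySem.Chars.replace.go ['-', '-'] ['-'] fuel l acc = acc.reverse ++ pvRep l := by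
  induction fuel generalizing l acc with
  | zero =>
    have : l = [] := by cases l <;> simp_all
    subst this
    rw [PySem.Chars.replace.go]
    simp [pvRep]
  | succ fuel ih =>
    cases l with
    | nil =>
      rw [PySem.Chars.replace.go]
      simp [pvRep]
      omega
    | cons c t =>
      rw [PySem.Chars.replace.go]
      by_cases hp : List.isPrefixOf ['-', '-'] (c :: t)
      · simp only [hp, if_true]
        obtain ⟨hc1, d, rest, ht, hd⟩ : c = '-' ∧ ∃ d rest, t = d :: rest ∧ d = '-' := by
          cases t with
          | nil => simp [List.isPrefixOf] at hp
          | cons d r =>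
            simp [List.isPrefixOf] at hp
            exact ⟨hp.1.symm, d, r, rfl, hp.2.symm⟩
        subst hc1 ht hd
        have hlen : rest.length ≤ fuel := by simp at h; omega
        rw [show List.drop ['-','-'].length ('-' :: '-' :: rest) = rest from rfl]
        rw [ih rest _ hlen, pvRep_dd]
        simp
      · simp only [hp]
        have hlen : t.length ≤ fuel := by simp at h; omega
        rw [ih t _ hlen]
        have hrep : pvRep (c :: t) = c :: pvRep t := by
          by_cases hc : c = '-'
          · subst hc
            cases t with
            | nil => simp [pvRep]
            | cons d r =>
              have hd : d ≠ '-' := by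
                intro hd; subst hd; simp [List.isPrefixOf] at hp
              exact pvRep_dash_cons_ne d r hd
          · exact pvRep_cons_ne c t hc
        rw [hrep]; simp

theorem pv_replace_eq (l : List Char) :
    PySem.Chars.replace l ['-', '-'] ['-'] = pvRep l := by
  rw [PySem.Chars.replace]
  simp only [List.isEmpty_cons]
  simpa using pv_go_eq l.length l [] le_rfl

-- collapsing A's generated string gives the core plus an optional trailing dash
theorem pv_repJ (t : List Char) (h : ∀ c ∈ t, c ≠ '-') (prev : Bool) :
    pvRep ((if prev then ['-'] else []) ++ pvJ t)
      = pvCore prev t ++ (if pvLast prev t then ['-'] else []) := by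
  induction t generalizing prev with
  | nil =>
    cases prev <;> simp [pvJ, pvCore, pvLast, pvRep]
  | cons c t' ih =>
    have hc : c ≠ '-' := h c (by simp)
    have h' : ∀ x ∈ t', x ≠ '-' := fun x hx => h x (by simp [hx])
    have key : pvRep ((if prev then ['-'] else []) ++ pvJ (c :: t'))
        = (if prev || pvOdd c then ['-'] else []) ++ c ::
            pvRep ((if pvOdd c then ['-'] else []) ++ pvJ t') := by
      have hJ : pvJ (c :: t') = pvBlk c ++ pvJ t' := by simp [pvJ]
      rw [hJ]
      cases prev with
      | false =>
        cases ho : pvOdd c with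
        | false =>
          simp only [pvBlk, ho, Bool.false_or, Bool.false_eq_true, if_false,
            List.nil_append, List.cons_append]
          rw [pvRep_cons_ne c _ hc]
        | true =>
          simp only [pvBlk, ho, Bool.false_or, Bool.false_eq_true, if_true, if_false,
            List.nil_append, List.cons_append]
          rw [pvRep_dash_cons_ne c _ hc, pvRep_cons_ne c _ hc]
      | true =>
        cases ho : pvOdd c with
        | false =>
          simp only [pvBlk, ho, Bool.true_or, Bool.false_eq_true, if_false, if_true,
            List.nil_append, List.cons_append]
          rw [pvRep_dash_cons_ne c _ hc, pvRep_cons_ne c _ hc]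
        | true =>
          simp only [pvBlk, ho, Bool.true_or, if_true, List.nil_append, List.cons_append]
          rw [pvRep_dd, pvRep_cons_ne c _ hc]
    rw [key, ih h' (pvOdd c)]
    simp [pvCore, pvLast]

-- last of c :: pvCore prev t is the last character of c :: t
theorem pv_core_last (t : List Char) (c : Char) (prev : Bool) :
    (c :: pvCore prev t).getLast? = (c :: t).getLast? := by
  induction t generalizing c prev with
  | nil => simp [pvCore]
  | cons b t' ih =>
    have h1 : (c :: pvCore prev (b :: t')).getLast? = (b :: pvCore (pvOdd b) t').getLast? := by
      show (c :: ((if prev || pvOdd b then ['-'] else []) ++ b :: pvCore (pvOdd b) t')).getLast? = _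
      cases h : (prev || pvOdd b) <;> simp
    rw [h1, ih]
    simp [List.getLast?_cons_cons]

-- strip("-") removes exactly the optional leading/trailing dash
theorem pv_strip (mid : List Char) (b1 b2 : Bool) (mh : Char) (mt : List Char)
    (hmid : mid = mh :: mt) (hh : mh ≠ '-') (hl : mid.getLast? ≠ some '-') :
    PySem.Chars.stripChars ((if b1 then ['-'] else []) ++ mid ++ (if b2 then ['-'] else [])) ['-']
      = mid := by
  obtain ⟨ml, r, hrev⟩ : ∃ ml r, mid.reverse = ml :: r := by
    cases hr : mid.reverse with
    | nil => rw [hmid] at hr; exact absurd (congrArg List.length hr) (by simp)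
    | cons a b => exact ⟨a, b, rfl⟩
  have hml : ml ≠ '-' := by
    intro hml
    apply hl
    have h2 := List.head?_reverse (l := mid)
    rw [hrev] at h2
    simp only [List.head?_cons] at h2
    rw [← h2, hml]
  have hrev2 : (ml :: r).reverse = mid := by rw [← hrev, List.reverse_reverse]
  have hdw1 : List.dropWhile (fun c : Char => decide (c = '-')) mid = mid := by
    rw [hmid]; simp [hh]
  have hne : mid ≠ [] := by rw [hmid]; simp
  simp only [PySem.Chars.stripChars]
  cases b1 <;> cases b2 <;>
    simp [List.dropWhile_append, List.reverse_append, hdw1, hne, hrev, hrev2, hml]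

-- digits of a natural number: nonempty and free of '-'
theorem pv_digitChar_ne (x : Nat) (hx : x < 10) : Nat.digitChar x ≠ '-' := by
  interval_cases x <;> decide

theorem pv_toDigitsCore_mem (fuel : Nat) : ∀ (n : Nat) (acc : List Char) (c : Char),
    c ∈ Nat.toDigitsCore 10 fuel n acc → c ∈ acc ∨ ∃ x, x < 10 ∧ c = Nat.digitChar x := by
  induction fuel with
  | zero => intro n acc c hc; rw [Nat.toDigitsCore] at hc; exact Or.inl hc
  | succ fuel ih =>
    intro n acc c hc
    rw [Nat.toDigitsCore] at hc
    by_cases hz : n / 10 = 0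
    · rw [if_pos hz] at hc
      rcases List.mem_cons.mp hc with h | h
      · exact Or.inr ⟨n % 10, Nat.mod_lt _ (by omega), h⟩
      · exact Or.inl h
    · rw [if_neg hz] at hc
      rcases ih (n / 10) _ c hc with h | h
      · rcases List.mem_cons.mp h with h' | h'
        · exact Or.inr ⟨n % 10, Nat.mod_lt _ (by omega), h'⟩
        · exact Or.inl h'
      · exact Or.inr h

theorem pv_toDigitsCore_len (fuel : Nat) : ∀ (n : Nat) (acc : List Char),
    acc.length ≤ (Nat.toDigitsCore 10 fuel n acc).length := by
  induction fuel with
  | zero => intro n acc; rw [Nat.toDigitsCore]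
  | succ fuel ih =>
    intro n acc
    rw [Nat.toDigitsCore]
    by_cases hz : n / 10 = 0
    · rw [if_pos hz]; simp
    · rw [if_neg hz]
      calc acc.length ≤ ((n % 10).digitChar :: acc).length := by simp
        _ ≤ _ := ih _ _

theorem pv_toDigits_ne_nil (m : Nat) : Nat.toDigits 10 m ≠ [] := by
  rw [Nat.toDigits, Nat.toDigitsCore]
  by_cases hz : m / 10 = 0
  · rw [if_pos hz]; simp
  · rw [if_neg hz]
    intro hnil
    have := pv_toDigitsCore_len m (m / 10) ((m % 10).digitChar :: [])
    rw [hnil] at this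
    simp at this

theorem pv_toDigits_no_dash (m : Nat) : ∀ c ∈ Nat.toDigits 10 m, c ≠ '-' := by
  intro c hc
  rcases pv_toDigitsCore_mem (m + 1) m [] c hc with h | ⟨x, hx10, hx⟩
  · simp at h
  · rw [hx]; exact pv_digitChar_ne x hx10

-- A's foldl builds the list of blocks
theorem pv_A_out (cs : List Char) (acc : List String) :
    cs.foldl (fun acc ch =>
      acc ++ [if pvOdd ch then String.ofList ['-', ch, '-'] else String.ofList [ch]]) acc
      = acc ++ cs.map (fun ch => String.ofList (pvBlk ch)) := by
  induction cs generalizing acc with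
  | nil => simp
  | cons c t ih =>
    simp only [List.foldl_cons, List.map_cons, ih]
    by_cases h : pvOdd c <;> simp [pvBlk, h]

-- ''.join = concatenation
theorem pv_join_nil (ps : List (List Char)) : PySem.Chars.join [] ps = ps.flatten := by
  rw [PySem.Chars.join]
  induction ps with
  | nil => simp [List.intercalate]
  | cons p ps ih =>
    cases ps with
    | nil => simp [List.intercalate, List.intersperse]
    | cons q qs =>
      simp only [List.intercalate, List.intersperse, List.flatten_cons] at ih ⊢
      simp [ih]

theorem pv_A_chars (cs : List Char) :
    (PySem.Str.join "" (cs.map (fun ch => String.ofList (pvBlk ch)))).toList = pvJ cs := by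
  rw [PySem.Str.toList_join]
  have hsep : ("" : String).toList = [] := rfl
  rw [hsep, pv_join_nil]
  simp [pvJ, List.flatMap_def, List.map_map, Function.comp_def]

-- B's fold over adjacent pairs builds the core
theorem pv_B_fold (t : List Char) (c : Char) (acc : List Char) :
    ((c :: t).zip t).foldl
      (fun acc ab => acc ++ (if pvOdd ab.1 || pvOdd ab.2 then ['-'] else []) ++ [ab.2]) acc
      = acc ++ pvCore (pvOdd c) t := by
  induction t generalizing c acc with
  | nil => simp [pvCore]
  | cons b t' ih =>
    simp only [List.zip_cons_cons, List.foldl_cons]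
    rw [ih b]
    simp [pvCore]

-- the two ports agree on every nonempty dash-free character list
theorem pv_main (c : Char) (t : List Char) (hc : c ≠ '-') (ht : ∀ x ∈ t, x ≠ '-') :
    PySem.Chars.stripChars (pvRep (pvJ (c :: t))) ['-'] = c :: pvCore (pvOdd c) t := by
  have hall : ∀ x ∈ c :: t, x ≠ '-' := by
    intro x hx; rcases List.mem_cons.mp hx with h | h
    · subst h; exact hc
    · exact ht x h
  have hrep := pv_repJ (c :: t) hall false
  simp only [Bool.false_eq_true, if_false, List.nil_append] at hrep
  have hcore : pvCore false (c :: t)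
      = (if pvOdd c then ['-'] else []) ++ c :: pvCore (pvOdd c) t := by
    simp [pvCore]
  rw [hcore] at hrep
  have hlast : (c :: pvCore (pvOdd c) t).getLast? ≠ some '-' := by
    rw [pv_core_last]
    intro hl
    have : (c :: t).getLast (by simp) = '-' := by
      have := List.getLast?_eq_some_getLast (l := c :: t) (by simp)
      rw [this] at hl; exact Option.some.inj hl
    exact hall _ (List.getLast_mem _) this
  rw [hrep]
  exact pv_strip _ (pvOdd c) (pvLast false (c :: t)) c (pvCore (pvOdd c) t) rfl hc hlast

-- ===== VERDICT (by name: the statement is the Claim_ definition above) =====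
theorem dash_ref_spec : Claim_equal_dash_ref := by
  intro n _
  show dash_ref n = dash_ref_alt n
  have habs : PySem.Int.toChars |n| = Nat.toDigits 10 (|n|).toNat := by
    rw [PySem.Int.toChars]
    rw [if_neg (not_lt.mpr (abs_nonneg n))]
  have hlist : (PySem.Int.toStr |n|).toList = Nat.toDigits 10 (|n|).toNat := by
    rw [PySem.Int.toList_toStr, habs]
  obtain ⟨c, t, hct⟩ : ∃ c t, Nat.toDigits 10 (|n|).toNat = c :: t := by
    cases h : Nat.toDigits 10 (|n|).toNat with
    | nil => exact absurd h (pv_toDigits_ne_nil _)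
    | cons a b => exact ⟨a, b, rfl⟩
  have hnd : ∀ x ∈ c :: t, x ≠ '-' := by
    rw [← hct]; exact pv_toDigits_no_dash _
  have hc : c ≠ '-' := hnd c (by simp)
  have ht : ∀ x ∈ t, x ≠ '-' := fun x hx => hnd x (by simp [hx])
  apply String.toList_inj.mp
  -- A side
  rw [dash_ref]
  simp only [hlist, hct]
  rw [pv_A_out _ []]
  simp only [List.nil_append]
  rw [PySem.Str.toList_stripChars, PySem.Str.toList_replace, pv_A_chars]
  have hrepl : ("--" : String).toList = ['-', '-'] := by decide
  have hdash : ("-" : String).toList = ['-'] := by decide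
  rw [hrepl, hdash, pv_replace_eq, pv_main c t hc ht]
  -- B side
  rw [dash_ref_alt]
  simp only [hlist, hct, List.drop_one, List.tail_cons, List.headD_cons]
  rw [pv_B_fold t c [c]]
  simp
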